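-- pv_equiv track=rewrite | github.com/shirinpirouzkhaah/Price-of-Precision | Preprocessing/Isolated_code/Analyzer2.py | remove_split_punctuation
-- ===== SOURCE A (Python) =====
-- def remove_split_punctuation(text):
--     # remove some useless char
--     remove_char = ['.', ',', '"', "'", '~']
--     text = ''.join(char if char not in remove_char else " " for char in text)
--     # split text
--     special_char = ['*', '(', ')', '[', ']', '{', '}', ';', '>',
--                     '<', '-', '/', ':', '=', '+',
--                     '"', "'", '!', '?']
--     text = ''.join(char if char not in special_char else " " + char + " " for char in text)
--     return text
-- ===== SOURCE B (Python) =====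
-- def remove_split_punctuation(text):
--     # one pass: removal takes precedence over splitting (quotes get blanked, not wrapped)
--     remove_char = '.,"\'~'
--     special_char = '*()[]{};><-/:=+"\'!?'
--     out = []
--     for char in text:
--         if char in remove_char:
--             out.append(" ")
--         elif char in special_char:
--             out.append(" " + char + " ")
--         else:
--             out.append(char)
--     return ''.join(out)
-- ===== Notes on version B (the rewrite author's own statement) =====
-- stated objective: faster
-- what changed: Fused A's two sequential join passes into a single pass that decides each character once (remove first, then wrap specials), halving traversals and intermediate string construction.
import Mathlib
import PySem

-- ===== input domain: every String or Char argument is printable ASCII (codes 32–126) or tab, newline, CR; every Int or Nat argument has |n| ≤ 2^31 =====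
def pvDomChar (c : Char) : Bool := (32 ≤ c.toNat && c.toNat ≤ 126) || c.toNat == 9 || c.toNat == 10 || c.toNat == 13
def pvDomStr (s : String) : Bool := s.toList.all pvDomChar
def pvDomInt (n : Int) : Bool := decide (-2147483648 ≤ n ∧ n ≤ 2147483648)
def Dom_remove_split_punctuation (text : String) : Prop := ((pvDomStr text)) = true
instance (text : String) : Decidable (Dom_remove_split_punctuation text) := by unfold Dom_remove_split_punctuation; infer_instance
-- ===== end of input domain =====

-- B fuses A's two join passes into one per-character decision pass (remove checked first); constant-factor speedup.

-- ===== PORT A =====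
def pvRemoveCharA : List Char := ['.', ',', '"', '\'', '~']
def pvSpecialCharA : List Char := ['*', '(', ')', '[', ']', '{', '}', ';', '>',
                                   '<', '-', '/', ':', '=', '+',
                                   '"', '\'', '!', '?']
-- ''.join over a generator of one-char-or-replacement fragments = flatMap over the chars
def pvPass1 (c : Char) : List Char := if c ∈ pvRemoveCharA then [' '] else [c]
def pvPass2 (c : Char) : List Char := if c ∈ pvSpecialCharA then [' ', c, ' '] else [c]
def remove_split_punctuation (text : String) : String :=
  let t1 : List Char := text.toList.flatMap pvPass1
  String.mk (t1.flatMap pvPass2)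

-- ===== PORT B =====
def pvRemoveCharB : List Char := ".,\"'~".toList
def pvSpecialCharB : List Char := "*()[]{};><-/:=+\"'!?".toList
def pvFragB (c : Char) : List Char :=
  if c ∈ pvRemoveCharB then [' ']
  else if c ∈ pvSpecialCharB then [' ', c, ' ']
  else [c]
def remove_split_punctuation_alt (text : String) : String :=
  String.mk (text.toList.flatMap pvFragB)

-- ===== PRECONDITION & SPEC =====
def Spec_remove_split_punctuation (text : String) (out : String) : Prop := out = remove_split_punctuation_alt text
instance (text : String) (out : String) : Decidable (Spec_remove_split_punctuation text out) := by unfold Spec_remove_split_punctuation; infer_instance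

-- ===== CLAIM (what is proved, stated in full; the proofs are below) =====
def Claim_equal_remove_split_punctuation : Prop := ∀ (text : String), Dom_remove_split_punctuation text → Spec_remove_split_punctuation text (remove_split_punctuation text)

-- ===== LEMMAS AND PROOFS =====
theorem pvFrag_eq (c : Char) : (pvPass1 c).flatMap pvPass2 = pvFragB c := by
  by_cases h1 : c ∈ pvRemoveCharA
  · have h1' : c ∈ pvRemoveCharB := by
      simp [pvRemoveCharA] at h1
      rcases h1 with h | h | h | h | h <;> simp [pvRemoveCharB, h]
    simp [pvPass1, pvFragB, h1, h1']
    decide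
  · have h1' : c ∉ pvRemoveCharB := by
      intro hc; apply h1
      simp [pvRemoveCharB] at hc
      rcases hc with h | h | h | h | h <;> simp [pvRemoveCharA, h]
    by_cases h2 : c ∈ pvSpecialCharA
    · have h2' : c ∈ pvSpecialCharB := by
        simp [pvSpecialCharA] at h2
        rcases h2 with h|h|h|h|h|h|h|h|h|h|h|h|h|h|h|h|h|h|h <;> simp [pvSpecialCharB, h]
      simp [pvPass1, pvPass2, pvFragB, h1, h1', h2, h2']
    · have h2' : c ∉ pvSpecialCharB := by
        intro hc; apply h2
        simp [pvSpecialCharB] at hc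
        rcases hc with h|h|h|h|h|h|h|h|h|h|h|h|h|h|h|h|h|h|h <;> simp [pvSpecialCharA, h]
      simp [pvPass1, pvPass2, pvFragB, h1, h1', h2, h2']

-- ===== VERDICT (by name: the statement is the Claim_ definition above) =====
theorem remove_split_punctuation_spec : Claim_equal_remove_split_punctuation := by
  intro text _
  unfold Spec_remove_split_punctuation remove_split_punctuation remove_split_punctuation_alt
  simp [List.flatMap_assoc, pvFrag_eq]
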